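-- pv_equiv track=rewrite | github.com/briggsy007/baseball-analytics | src/analytics/bullpen.py | get_upcoming_batters
-- ===== SOURCE A (Python) =====
-- def get_upcoming_batters(
--     lineup: list[dict],
--     current_batter_idx: int,
--     n: int = 6,
-- ) -> list[dict]:
--     """Return the next *n* batters in the lineup, wrapping around.
--
--     Args:
--         lineup: List of dicts with at least ``"batter_id"`` and ``"name"``.
--         current_batter_idx: Zero-based index of the current batter in the
--                             lineup.
--         n: Number of upcoming batters to return (default 6).
--
--     Returns:
--         List of the next *n* batter dicts from the lineup (circular).
--     """
--     if not lineup: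
--         return []
--
--     size = len(lineup)
--     result: list[dict] = []
--     for offset in range(1, n + 1):
--         idx = (current_batter_idx + offset) % size
--         result.append(lineup[idx])
--
--     return result
-- ===== SOURCE B (Python) =====
-- def get_upcoming_batters(lineup, current_batter_idx, n=6):
--     """Return the next n batters in the lineup, wrapping around (circular)."""
--     if not lineup or n <= 0:
--         return []
--     size = len(lineup)
--     start = (current_batter_idx + 1) % size
--     rotated = lineup[start:] + lineup[:start]
--     return (rotated * (n // size + 1))[:n]
-- ===== Notes on version B (the rewrite author's own statement) =====
-- stated objective: alternative
-- what changed: Replaces the per-offset modular-index loop by one rotation (two slices), list repetition and a final slice, so no element-by-element loop or modular indexing per element remains.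
import Mathlib
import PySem

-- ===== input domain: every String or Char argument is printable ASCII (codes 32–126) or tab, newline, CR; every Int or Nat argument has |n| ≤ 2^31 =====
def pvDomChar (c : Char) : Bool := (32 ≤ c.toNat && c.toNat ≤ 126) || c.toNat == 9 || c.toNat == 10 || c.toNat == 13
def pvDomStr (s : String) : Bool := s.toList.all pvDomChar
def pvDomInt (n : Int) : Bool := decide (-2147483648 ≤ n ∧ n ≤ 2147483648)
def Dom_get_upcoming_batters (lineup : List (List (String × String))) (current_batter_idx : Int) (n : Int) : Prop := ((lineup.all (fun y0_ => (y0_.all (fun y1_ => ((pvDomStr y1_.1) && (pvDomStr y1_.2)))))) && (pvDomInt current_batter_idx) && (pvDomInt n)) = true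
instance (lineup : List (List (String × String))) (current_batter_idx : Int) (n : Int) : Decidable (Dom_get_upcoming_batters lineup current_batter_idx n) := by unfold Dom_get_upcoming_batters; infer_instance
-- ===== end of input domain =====

-- B replaces A's per-offset modular-index loop by rotate-then-repeat-then-slice (alternative decomposition, same cost).


-- ===== PORT A =====
-- lineup[idx] is ported with pyGetD: the index (current_batter_idx + offset) % size always
-- lies in [0, size), so the default is never used and the port is exact.
def get_upcoming_batters (lineup : List (List (String × String))) (current_batter_idx : Int) (n : Int) : List (List (String × String)) :=
  if lineup = [] then []
  else
    let size : Int := lineup.length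
    (PySem.List.pyRange 1 (n + 1) 1).foldl
      (fun result offset =>
        result ++ [PySem.List.pyGetD lineup (PySem.Int.mod (current_batter_idx + offset) size) []])
      []

-- ===== PORT B =====
-- Python's `rotated * k` (k = n // size + 1 ≥ 1 here) is ported as replicate/flatten,
-- exact for every nonnegative k.
def get_upcoming_batters_alt (lineup : List (List (String × String))) (current_batter_idx : Int) (n : Int) : List (List (String × String)) :=
  if lineup = [] ∨ n ≤ 0 then []
  else
    let size : Int := lineup.length
    let start := PySem.Int.mod (current_batter_idx + 1) size
    let rotated := PySem.List.slice lineup (some start) none ++ PySem.List.slice lineup none (some start)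
    PySem.List.slice
      (List.flatten (List.replicate (PySem.Int.floordiv n size + 1).toNat rotated))
      none (some n)

-- ===== PRECONDITION & SPEC =====
def Spec_get_upcoming_batters (lineup : List (List (String × String))) (current_batter_idx : Int) (n : Int) (out : List (List (String × String))) : Prop := out = get_upcoming_batters_alt lineup current_batter_idx n
instance (lineup : List (List (String × String))) (current_batter_idx : Int) (n : Int) (out : List (List (String × String))) : Decidable (Spec_get_upcoming_batters lineup current_batter_idx n out) := by unfold Spec_get_upcoming_batters; infer_instance

-- ===== CLAIM (what is proved, stated in full; the proofs are below) =====
def Claim_equal_get_upcoming_batters : Prop := ∀ (lineup : List (List (String × String))) (current_batter_idx : Int) (n : Int), Dom_get_upcoming_batters lineup current_batter_idx n → Spec_get_upcoming_batters lineup current_batter_idx n (get_upcoming_batters lineup current_batter_idx n)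

-- ===== LEMMAS AND PROOFS =====

-- range(a, a+m) as a mapped List.range
theorem pyRange_one_add_natCast (a : Int) (m : Nat) :
    PySem.List.pyRange a (a + m) 1 = (List.range m).map (fun (k : Nat) => a + (k : Int)) := by
  induction m with
  | zero => simp [PySem.List.pyRange_one_eq_nil]
  | succ m ih =>
      have h : a + (m + 1 : Nat) = (a + m) + 1 := by push_cast; ring
      rw [h, PySem.List.pyRange_one_succ_right (by omega), ih, List.range_succ]
      simp

-- indexing a flattened replicate is modular indexing
theorem getElem?_flatten_replicate {α : Type} (l : List α) (K i : Nat) (h : i < K * l.length) :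
    (List.flatten (List.replicate K l))[i]? = l[i % l.length]? := by
  induction K generalizing i with
  | zero => omega
  | succ K ih =>
      have hm : (K + 1) * l.length = K * l.length + l.length := by ring
      rw [hm] at h
      rw [List.replicate_succ, List.flatten_cons, List.getElem?_append]
      by_cases hi : i < l.length
      · simp [hi, Nat.mod_eq_of_lt hi]
      · rw [if_neg hi, ih (i - l.length) (by omega),
            ← Nat.mod_eq_sub_mod (Nat.le_of_not_lt hi)]

-- indexing a rotation is modular indexing
theorem getElem?_rotate {α : Type} (l : List α) (s j : Nat) (hs : s < l.length)
    (hj : j < l.length) :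
    (l.drop s ++ l.take s)[j]? = l[(s + j) % l.length]? := by
  rw [List.getElem?_append]
  simp only [List.length_drop]
  by_cases h1 : j < l.length - s
  · rw [if_pos h1, List.getElem?_drop]
    have : (s + j) % l.length = s + j := Nat.mod_eq_of_lt (by omega)
    rw [this]
  · rw [if_neg h1]
    have h3 : j - (l.length - s) < s := by omega
    rw [List.getElem?_take_of_lt h3]
    have hle : l.length ≤ s + j := by omega
    rw [Nat.mod_eq_sub_mod hle, Nat.mod_eq_of_lt (by omega)]
    congr 1
    omega

-- ===== VERDICT (by name: the statement is the Claim_ definition above) =====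
theorem get_upcoming_batters_spec : Claim_equal_get_upcoming_batters := by
  intro lineup cur n _
  unfold Spec_get_upcoming_batters get_upcoming_batters get_upcoming_batters_alt
  by_cases hnil : lineup = []
  · simp [hnil]
  · rw [if_neg hnil]
    by_cases hn : n ≤ 0
    · rw [if_pos (Or.inr hn), PySem.List.pyRange_one_eq_nil (by omega)]
      rfl
    · rw [if_neg (by push Not; exact ⟨hnil, by omega⟩)]
      have hn0 : 0 < n := by omega
      have hlen : 0 < lineup.length := List.length_pos_iff.mpr hnil
      have hlenI : (0 : Int) < (lineup.length : Int) := by exact_mod_cast hlen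
      -- A side: loop → map over a range
      rw [PySem.List.foldl_append_singleton_eq_map, List.nil_append]
      rw [show (n + 1 : Int) = 1 + (n.toNat : Nat) from by omega, pyRange_one_add_natCast,
          List.map_map]
      -- B side: slices → drop/take
      have hs0 : (0 : Int) ≤ PySem.Int.mod (cur + 1) (lineup.length : Int) :=
        PySem.Int.mod_nonneg _ hlenI
      have hsl : PySem.Int.mod (cur + 1) (lineup.length : Int) < (lineup.length : Int) :=
        PySem.Int.mod_lt _ hlenI
      simp only
      rw [PySem.List.slice_from lineup hs0, PySem.List.slice_to lineup hs0,
          PySem.List.slice_to _ (by omega : (0:Int) ≤ n)]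
      set sN : Nat := (PySem.Int.mod (cur + 1) (lineup.length : Int)).toNat with hsN
      have hsNl : sN < lineup.length := by
        rw [hsN]; omega
      set rotated := lineup.drop sN ++ lineup.take sN with hrot
      have hrotlen : rotated.length = lineup.length := by
        simp [hrot]; omega
      -- the repetition factor covers n elements
      set K : Nat := (PySem.Int.floordiv n (lineup.length : Int) + 1).toNat with hK
      have hNK : n.toNat ≤ K * lineup.length := by
        have hfd : PySem.Int.floordiv n (lineup.length : Int) = n / (lineup.length : Int) :=
          PySem.Int.floordiv_eq_ediv_of_pos hlenI
        have hq0 : 0 ≤ n / (lineup.length : Int) := Int.ediv_nonneg (by omega) (by omega)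
        have hqe : n % (lineup.length : Int) + (lineup.length : Int) * (n / (lineup.length : Int)) = n :=
          Int.emod_add_mul_ediv n (lineup.length : Int)
        have hre : n % (lineup.length : Int) < (lineup.length : Int) := Int.emod_lt_of_pos n hlenI
        have hcast : ((K * lineup.length : Nat) : Int)
            = (n / (lineup.length : Int) + 1) * (lineup.length : Int) := by
          rw [hK, hfd]
          push_cast [Int.toNat_of_nonneg (by omega : (0:Int) ≤ n / (lineup.length : Int) + 1)]
          ring
        have hlt : (n : Int) < ((K * lineup.length : Nat) : Int) := by
          rw [hcast]; nlinarith [hqe, hre]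
        omega
      -- pointwise comparison
      apply List.ext_getElem?
      intro i
      rw [List.getElem?_map]
      by_cases hi : i < n.toNat
      · rw [List.getElem?_range hi, List.getElem?_take_of_lt (by omega),
            getElem?_flatten_replicate rotated K i (by rw [hrotlen]; omega), hrotlen,
            getElem?_rotate lineup sN (i % lineup.length) hsNl (Nat.mod_lt _ hlen)]
        have hidx : PySem.Int.mod (cur + (1 + (i : Int))) (lineup.length : Int)
            = (((sN + i % lineup.length) % lineup.length : Nat) : Int) := by
          rw [PySem.Int.mod_eq_emod_of_pos hlenI]
          push_cast
          rw [Int.toNat_of_nonneg hs0, PySem.Int.mod_eq_emod_of_pos hlenI]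
          conv_lhs => rw [show cur + (1 + (i:Int)) = (cur + 1) + i from by ring, Int.add_emod]
        rw [List.getElem?_eq_getElem (Nat.mod_lt _ hlen)]
        simp only [Option.map_some, Function.comp_apply, Option.some.injEq]
        rw [PySem.List.pyGetD_eq_getElem lineup [] (by rw [hidx]; positivity)
              (by rw [hidx]; exact_mod_cast Nat.mod_lt _ hlen)]
        simp [hidx]
        congr 1
      · rw [List.getElem?_eq_none (by simpa using hi),
            List.getElem?_eq_none (by simp; omega)]
        rfl
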